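-- pv_equiv track=rewrite | github.com/FahrenheitResearch/gpu-wm | tools/render_wrf_products.py | _required_vars_for_products
-- ===== SOURCE A (Python) =====
-- def _required_vars_for_products(products: list[str]) -> dict[str, tuple[int, ...]]:
--     checks: dict[str, tuple[int, ...]] = {
--         "XLAT": (),
--         "XLONG": (),
--     }
--     for product in products:
--         if product.startswith("field:"):
--             field_name = product.split(":", 1)[1].lower()
--             if field_name == "t2":
--                 checks["T2"] = ()
--                 continue
--             if field_name in {"dp2m", "rh2m"}:
--                 checks["T2"] = ()
--                 checks["Q2"] = ()
--                 checks["PSFC"] = ()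
--                 continue
--             if field_name == "slp":
--                 checks["P"] = (0, 0)
--                 checks["PB"] = (0, 0)
--                 checks["T"] = (0, 0)
--                 checks["PSFC"] = ()
--                 continue
--
--         checks["P"] = (0, 0)
--         checks["PB"] = (0, 0)
--         checks["T"] = (0, 0)
--         checks["PSFC"] = ()
--     return checks
-- ===== SOURCE B (Python) =====
-- # Reverse pass: compute the first-occurrence-ordered list of required key names
-- # for the product list's suffixes, then attach the constant shapes once at the end.
-- _FIELD_KEYS = {"t2": ("T2",), "dp2m": ("T2", "Q2", "PSFC"), "rh2m": ("T2", "Q2", "PSFC")}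
-- _DEFAULT_KEYS = ("P", "PB", "T", "PSFC")
-- _SHAPES = {"T2": (), "Q2": (), "PSFC": (), "P": (0, 0), "PB": (0, 0), "T": (0, 0)}
--
-- def _keys_for(product):
--     if product.startswith("field:"):
--         return _FIELD_KEYS.get(product.split(":", 1)[1].lower(), _DEFAULT_KEYS)
--     return _DEFAULT_KEYS
--
-- def _required_vars_for_products(products: list[str]) -> dict[str, tuple[int, ...]]:
--     # keys = first-occurrence-ordered key names required by the suffix processed so far
--     keys: list[str] = []
--     for product in reversed(products):
--         head = _keys_for(product)
--         keys = list(head) + [k for k in keys if k not in head]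
--     out = {"XLAT": (), "XLONG": ()}
--     for k in keys:
--         out[k] = _SHAPES[k]
--     return out
-- ===== Notes on version B (the rewrite author's own statement) =====
-- stated objective: alternative
-- what changed: Instead of A's forward pass mutating a dict through an if/elif chain, B traverses the products in reverse maintaining only the first-occurrence-ordered list of required key names (a keep-first merge of per-product key tuples), and attaches the constant shapes in one final step.
import Mathlib
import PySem

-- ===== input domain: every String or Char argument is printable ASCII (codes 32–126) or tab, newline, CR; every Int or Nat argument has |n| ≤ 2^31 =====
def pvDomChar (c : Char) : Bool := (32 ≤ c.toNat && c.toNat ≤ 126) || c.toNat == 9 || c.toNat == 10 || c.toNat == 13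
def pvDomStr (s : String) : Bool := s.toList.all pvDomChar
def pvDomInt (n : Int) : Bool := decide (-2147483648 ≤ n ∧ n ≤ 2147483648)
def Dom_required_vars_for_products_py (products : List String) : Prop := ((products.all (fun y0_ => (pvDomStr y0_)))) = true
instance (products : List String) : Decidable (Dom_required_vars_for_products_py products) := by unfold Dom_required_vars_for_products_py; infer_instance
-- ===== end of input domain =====

-- B is a different decomposition: a reverse pass computing only the first-occurrence-ordered
-- list of required key names, then the constant shapes attached once (objective: alternative).


-- ===== PORT A =====
-- the shared 3D tail (reached both from the non-"field:" case and from an unknown field name)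
def pvStep3d (d : PySem.Dict String (List Int)) : PySem.Dict String (List Int) :=
  (((d.insert "P" [0, 0]).insert "PB" [0, 0]).insert "T" [0, 0]).insert "PSFC" []

def pvStepA (d : PySem.Dict String (List Int)) (product : String) : PySem.Dict String (List Int) :=
  if PySem.Str.startswith product "field:" then
    -- product.split(":", 1)[1].lower(); index 1 exists since the separator occurs in product
    let field_name := PySem.Str.lower (((PySem.Str.splitMax? product ":" 1).getD []).getD 1 "")
    if field_name = "t2" then d.insert "T2" []
    else if field_name = "dp2m" ∨ field_name = "rh2m" then
      ((d.insert "T2" []).insert "Q2" []).insert "PSFC" []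
    else if field_name = "slp" then
      (((d.insert "P" [0, 0]).insert "PB" [0, 0]).insert "T" [0, 0]).insert "PSFC" []
    else pvStep3d d
  else pvStep3d d

def required_vars_for_products_py (products : List String) : List (String × List Int) :=
  (products.foldl pvStepA (PySem.Dict.ofList [("XLAT", []), ("XLONG", [])])).items

-- ===== PORT B =====
def pvFieldKeys : PySem.Dict String (List String) :=
  PySem.Dict.ofList
    [("t2", ["T2"]),
     ("dp2m", ["T2", "Q2", "PSFC"]),
     ("rh2m", ["T2", "Q2", "PSFC"])]

def pvDefaultKeys : List String := ["P", "PB", "T", "PSFC"]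

def pvShapes : PySem.Dict String (List Int) :=
  PySem.Dict.ofList
    [("T2", []), ("Q2", []), ("PSFC", []), ("P", [0, 0]), ("PB", [0, 0]), ("T", [0, 0])]

def pvKeysFor (product : String) : List String :=
  if PySem.Str.startswith product "field:" then
    pvFieldKeys.getD (PySem.Str.lower (((PySem.Str.splitMax? product ":" 1).getD []).getD 1 "")) pvDefaultKeys
  else pvDefaultKeys

def required_vars_for_products_py_alt (products : List String) : List (String × List Int) :=
  -- reverse pass maintaining the first-occurrence-ordered key names of the suffix
  let keys := products.reverse.foldl
    (fun keys product =>
      let head := pvKeysFor product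
      head ++ keys.filter (fun k => !head.contains k)) []
  -- _SHAPES[k]: every k produced above is a key of pvShapes, so the lookup is total here
  (keys.foldl (fun d k => d.insert k (pvShapes.getD k []))
    (PySem.Dict.ofList [("XLAT", []), ("XLONG", [])])).items

-- ===== PRECONDITION & SPEC =====
def Spec_required_vars_for_products_py (products : List String) (out : List (String × List Int)) : Prop := out = required_vars_for_products_py_alt products
instance (products : List String) (out : List (String × List Int)) : Decidable (Spec_required_vars_for_products_py products out) := by unfold Spec_required_vars_for_products_py; infer_instance

-- ===== CLAIM (what is proved, stated in full; the proofs are below) =====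
def Claim_equal_required_vars_for_products_py : Prop := ∀ (products : List String), Dom_required_vars_for_products_py products → Spec_required_vars_for_products_py products (required_vars_for_products_py products)

-- ===== LEMMAS AND PROOFS =====
-- the six non-base key names and their constant shape
def pvSix : List String := ["T2", "Q2", "PSFC", "P", "PB", "T"]
def pvVal (k : String) : List Int := if k = "P" ∨ k = "PB" ∨ k = "T" then [0, 0] else []
def pvBase : List (String × List Int) := [("XLAT", []), ("XLONG", [])]
def pvF (k : String) : String × List Int := (k, pvVal k)
-- forward chunk merge (first occurrence wins)
def pvAddNew (acc ks : List String) : List String := acc ++ ks.filter (fun k => !acc.contains k)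
-- backward chunk merge (B's step)
def pvMergeB (ks keys : List String) : List String := ks ++ keys.filter (fun k => !ks.contains k)
-- B's first-occurrence key list, foldr form
def pvK (ps : List String) : List String := ps.foldr (fun p keys => pvMergeB (pvKeysFor p) keys) []

theorem pvKeysFor_cases (p : String) :
    pvKeysFor p = ["T2"] ∨ pvKeysFor p = ["T2", "Q2", "PSFC"] ∨ pvKeysFor p = pvDefaultKeys := by
  unfold pvKeysFor
  by_cases h : PySem.Str.startswith p "field:" = true
  · rw [if_pos h]
    set fn := PySem.Str.lower (((PySem.Str.splitMax? p ":" 1).getD []).getD 1 "") with hfn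
    by_cases h1 : fn = "t2"
    · simp [h1, pvFieldKeys, PySem.Dict.ofList, PySem.Dict.getD, PySem.Dict.get?,
        PySem.Dict.update, PySem.Dict.insert, PySem.Dict.empty]
    · by_cases h2 : fn = "dp2m"
      · simp [h2, pvFieldKeys, PySem.Dict.ofList, PySem.Dict.getD, PySem.Dict.get?,
          PySem.Dict.update, PySem.Dict.insert, PySem.Dict.empty]
      · by_cases h3 : fn = "rh2m"
        · simp [h3, pvFieldKeys, PySem.Dict.ofList, PySem.Dict.getD, PySem.Dict.get?,
            PySem.Dict.update, PySem.Dict.insert, PySem.Dict.empty]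
        · have e1 : ("t2" == fn) = false := by rw [beq_eq_false_iff_ne]; exact fun e => h1 e.symm
          have e2 : ("dp2m" == fn) = false := by rw [beq_eq_false_iff_ne]; exact fun e => h2 e.symm
          have e3 : ("rh2m" == fn) = false := by rw [beq_eq_false_iff_ne]; exact fun e => h3 e.symm
          right; right
          simp [pvFieldKeys, PySem.Dict.ofList, PySem.Dict.getD, PySem.Dict.get?,
            PySem.Dict.update, PySem.Dict.insert, PySem.Dict.empty, List.find?, e1, e2, e3]
  · rw [if_neg h]; right; right; rfl

-- A's step = chunk-wise inserts of (k, pvVal k)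
theorem pvStepA_eq_chunk (d : PySem.Dict String (List Int)) (p : String) :
    pvStepA d p = (pvKeysFor p).foldl (fun d k => d.insert k (pvVal k)) d := by
  unfold pvStepA pvKeysFor
  by_cases h : PySem.Str.startswith p "field:" = true
  · rw [if_pos h, if_pos h]
    set fn := PySem.Str.lower (((PySem.Str.splitMax? p ":" 1).getD []).getD 1 "") with hfn
    by_cases h1 : fn = "t2"
    · simp [h1, pvFieldKeys, PySem.Dict.ofList, PySem.Dict.getD, PySem.Dict.get?,
        PySem.Dict.update, PySem.Dict.insert, PySem.Dict.empty, List.foldl, pvVal]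
    · by_cases h2 : fn = "dp2m"
      · simp [h2, pvFieldKeys, PySem.Dict.ofList, PySem.Dict.getD, PySem.Dict.get?,
          PySem.Dict.update, PySem.Dict.insert, PySem.Dict.empty, List.foldl, pvVal]
      · by_cases h3 : fn = "rh2m"
        · simp [h3, pvFieldKeys, PySem.Dict.ofList, PySem.Dict.getD, PySem.Dict.get?,
            PySem.Dict.update, PySem.Dict.insert, PySem.Dict.empty, List.foldl, pvVal]
        · have e1 : ("t2" == fn) = false := by rw [beq_eq_false_iff_ne]; exact fun e => h1 e.symm
          have e2 : ("dp2m" == fn) = false := by rw [beq_eq_false_iff_ne]; exact fun e => h2 e.symm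
          have e3 : ("rh2m" == fn) = false := by rw [beq_eq_false_iff_ne]; exact fun e => h3 e.symm
          have hd : pvFieldKeys.getD fn pvDefaultKeys = pvDefaultKeys := by
            simp [pvFieldKeys, PySem.Dict.ofList, PySem.Dict.getD, PySem.Dict.get?,
              PySem.Dict.update, PySem.Dict.insert, PySem.Dict.empty, List.find?, e1, e2, e3]
          rw [hd]
          by_cases h4 : fn = "slp"
          · simp [h4, pvDefaultKeys, List.foldl, pvVal]
          · simp [h1, h2, h3, h4, pvStep3d, pvDefaultKeys, List.foldl, pvVal]
  · rw [if_neg h, if_neg h]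
    simp [pvStep3d, pvDefaultKeys, List.foldl, pvVal]

-- keys of the pvF-image are the keys themselves
theorem pvMap_fst (l : List String) :
    List.map (fun p : String × List Int => p.1) (l.map pvF) = l := by
  rw [List.map_map]
  simp [Function.comp_def, pvF]

-- inserting (k, pvVal k) into a state dict: append if new, identity if present
theorem pvInsert_state (acc : List String) (k : String) (hk : k ∈ pvSix) :
    (PySem.Dict.mk (pvBase ++ acc.map pvF)).insert k (pvVal k)
      = PySem.Dict.mk (pvBase ++ (if acc.contains k then acc else acc ++ [k]).map pvF) := by
  have hkx : k ≠ "XLAT" ∧ k ≠ "XLONG" := by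
    simp only [pvSix, List.mem_cons, List.not_mem_nil, or_false] at hk
    rcases hk with rfl | rfl | rfl | rfl | rfl | rfl <;> exact ⟨by decide, by decide⟩
  have hkeys : (PySem.Dict.mk (pvBase ++ acc.map pvF)).keys = ["XLAT", "XLONG"] ++ acc := by
    simp only [PySem.Dict.keys]
    show List.map (fun p : String × List Int => p.1) (pvBase ++ acc.map pvF) = _
    rw [List.map_append, pvMap_fst]
    rfl
  have hcont : (PySem.Dict.mk (pvBase ++ acc.map pvF)).contains k = acc.contains k := by
    rw [PySem.Dict.contains_eq_decide_mem_keys, hkeys, List.contains_eq_mem]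
    simp [hkx.1, hkx.2]
  apply PySem.Dict.ext
  rw [PySem.Dict.items_insert, hcont]
  cases hm : acc.contains k
  · rw [if_neg (by simp), if_neg (by simp)]
    show (pvBase ++ acc.map pvF) ++ [(k, pvVal k)] = pvBase ++ (acc ++ [k]).map pvF
    simp [pvF]
  · rw [if_pos rfl, if_pos rfl]
    show (pvBase ++ acc.map pvF).map (fun p => if p.1 == k then (k, pvVal k) else p)
        = pvBase ++ acc.map pvF
    rw [List.map_append]
    congr 1
    · simp only [pvBase, List.map_cons, List.map_nil]
      rw [if_neg (by simp [Ne.symm hkx.1]), if_neg (by simp [Ne.symm hkx.2])]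
    · rw [List.map_map]
      apply List.map_congr_left
      intro a _
      simp only [Function.comp_def, pvF]
      by_cases hak : a = k
      · subst hak; simp
      · rw [if_neg (by simp [hak])]

-- folding one chunk of inserts = pvAddNew, for a Nodup chunk inside pvSix
theorem pvChunk_fold (ks : List String) (hnd : ks.Nodup) (hsub : ∀ k ∈ ks, k ∈ pvSix) (acc : List String) :
    ks.foldl (fun d k => d.insert k (pvVal k)) (PySem.Dict.mk (pvBase ++ acc.map pvF))
      = PySem.Dict.mk (pvBase ++ (pvAddNew acc ks).map pvF) := by
  induction ks generalizing acc with
  | nil => simp [pvAddNew]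
  | cons k ks ih =>
      have hk : k ∈ pvSix := hsub k (by simp)
      have hnd' : ks.Nodup := hnd.of_cons
      have hknotin : k ∉ ks := (List.nodup_cons.mp hnd).1
      rw [List.foldl_cons, pvInsert_state acc k hk]
      cases hm : acc.contains k
      · rw [if_neg (by simp), ih hnd' (fun x hx => hsub x (by simp [hx]))]
        have hlist : pvAddNew (acc ++ [k]) ks = pvAddNew acc (k :: ks) := by
          simp only [pvAddNew, List.filter_cons]
          rw [if_pos (by simp [List.contains_eq_mem] at hm ⊢; exact hm), List.append_assoc,
            List.singleton_append]
          congr 2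
          apply List.filter_congr
          intro x hx
          have hxk : x ≠ k := fun e => hknotin (e ▸ hx)
          simp [hxk]
        rw [hlist]
      · rw [if_pos rfl, ih hnd' (fun x hx => hsub x (by simp [hx]))]
        have hlist : pvAddNew acc ks = pvAddNew acc (k :: ks) := by
          simp only [pvAddNew, List.filter_cons]
          rw [if_neg (by simp [List.contains_eq_mem] at hm ⊢; exact hm)]
        rw [hlist]

-- A over the whole list, in chunk form
theorem pvA_char (ps : List String) (acc : List String) :
    ps.foldl pvStepA (PySem.Dict.mk (pvBase ++ acc.map pvF))
      = PySem.Dict.mk (pvBase ++ ((ps.map pvKeysFor).foldl pvAddNew acc).map pvF) := by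
  induction ps generalizing acc with
  | nil => rfl
  | cons p ps ih =>
      have hchunk : (pvKeysFor p).Nodup ∧ ∀ k ∈ pvKeysFor p, k ∈ pvSix := by
        rcases pvKeysFor_cases p with h | h | h <;> rw [h] <;> exact ⟨by decide, by decide⟩
      rw [List.foldl_cons, pvStepA_eq_chunk, pvChunk_fold _ hchunk.1 hchunk.2, ih,
        List.map_cons, List.foldl_cons]

-- forward fold of pvAddNew = backward fold of pvMergeB
theorem pvFwd_eq_bwd (chunks : List (List String)) (acc : List String) :
    chunks.foldl pvAddNew acc = acc ++ (chunks.foldr pvMergeB []).filter (fun k => !acc.contains k) := by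
  induction chunks generalizing acc with
  | nil => simp
  | cons c cs ih =>
      rw [List.foldl_cons, ih (pvAddNew acc c), List.foldr_cons]
      show pvAddNew acc c ++ _ = acc ++ (pvMergeB c (cs.foldr pvMergeB [])).filter _
      simp only [pvAddNew, pvMergeB, List.filter_append, List.append_assoc]
      congr 2
      rw [List.filter_filter]
      apply List.filter_congr
      intro x _
      cases hxa : acc.contains x <;> cases hxc : c.contains x <;>
        simp_all [List.contains_eq_mem, List.mem_filter]

-- pvK is Nodup and lives inside pvSix
theorem pvK_wf (ps : List String) : (pvK ps).Nodup ∧ ∀ k ∈ pvK ps, k ∈ pvSix := by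
  induction ps with
  | nil => exact ⟨List.nodup_nil, by simp [pvK]⟩
  | cons p ps ih =>
      have hchunk : (pvKeysFor p).Nodup ∧ ∀ k ∈ pvKeysFor p, k ∈ pvSix := by
        rcases pvKeysFor_cases p with h | h | h <;> rw [h] <;> exact ⟨by decide, by decide⟩
      have hstep : pvK (p :: ps) = pvMergeB (pvKeysFor p) (pvK ps) := rfl
      constructor
      · rw [hstep]
        apply List.Nodup.append hchunk.1 (ih.1.filter _)
        intro x hx hx'
        have := (List.mem_filter.mp hx').2
        simp [List.contains_eq_mem, hx] at this
      · rw [hstep]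
        intro k hkm
        rcases List.mem_append.mp hkm with hx | hx
        · exact hchunk.2 k hx
        · exact ih.2 k (List.mem_filter.mp hx).1

-- on pvSix, the shapes table agrees with pvVal
theorem pvShapes_eq_val (k : String) (hk : k ∈ pvSix) : pvShapes.getD k [] = pvVal k := by
  simp only [pvSix, List.mem_cons, List.not_mem_nil, or_false] at hk
  rcases hk with rfl | rfl | rfl | rfl | rfl | rfl <;> decide

theorem pvOfBase : PySem.Dict.ofList [("XLAT", ([] : List Int)), ("XLONG", [])] = PySem.Dict.mk pvBase := by
  decide

-- ===== VERDICT (by name: the statement is the Claim_ definition above) =====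
theorem required_vars_for_products_py_spec : Claim_equal_required_vars_for_products_py := by
  intro products _
  unfold Spec_required_vars_for_products_py required_vars_for_products_py required_vars_for_products_py_alt
  show (products.foldl pvStepA (PySem.Dict.ofList [("XLAT", []), ("XLONG", [])])).items
      = ((products.reverse.foldl
            (fun keys product => pvKeysFor product ++ keys.filter (fun k => !(pvKeysFor product).contains k)) []).foldl
          (fun d k => d.insert k (pvShapes.getD k []))
          (PySem.Dict.ofList [("XLAT", []), ("XLONG", [])])).items
  have hrev : products.reverse.foldl
      (fun keys product => pvKeysFor product ++ keys.filter (fun k => !(pvKeysFor product).contains k)) []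
      = pvK products := by
    rw [List.foldl_reverse]; rfl
  have hwf := pvK_wf products
  have h0 : (PySem.Dict.mk pvBase) = PySem.Dict.mk (pvBase ++ ([] : List String).map pvF) := by simp
  have hA : products.foldl pvStepA (PySem.Dict.mk pvBase)
      = PySem.Dict.mk (pvBase ++ (pvK products).map pvF) := by
    rw [h0, pvA_char, pvFwd_eq_bwd]
    have hfr : (products.map pvKeysFor).foldr pvMergeB [] = pvK products := by
      rw [List.foldr_map]; rfl
    simp [hfr]
  have hB : (pvK products).foldl (fun d k => d.insert k (pvShapes.getD k [])) (PySem.Dict.mk pvBase)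
      = PySem.Dict.mk (pvBase ++ (pvK products).map pvF) := by
    have hcong : (pvK products).foldl (fun d k => d.insert k (pvShapes.getD k [])) (PySem.Dict.mk pvBase)
        = (pvK products).foldl (fun d k => d.insert k (pvVal k)) (PySem.Dict.mk pvBase) := by
      apply PySem.List.foldl_congr_mem
      intro d k hkm
      rw [pvShapes_eq_val k (hwf.2 k hkm)]
    rw [hcong, h0, pvChunk_fold _ hwf.1 hwf.2]
    have : pvAddNew [] (pvK products) = pvK products := by simp [pvAddNew]
    rw [this]
  rw [pvOfBase, hrev, hA, hB]
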